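-- pv_equiv track=rewrite | github.com/ASSERT-KTH/Mokav | experiments/pynguin/c4b/return-lst/generated_tests/src_736/6/src_736.py | func
-- ===== SOURCE A (Python) =====
-- def func(*args):
-- 	ret_values = []
--
-- 	n = int(args[0])
-- 	if (n < 3):
-- 	    ret_values.append((- 1))
-- 	elif (n == 3):
-- 	    ret_values.append(210)
-- 	else:
-- 	    x = (7 - [1, 3, 2, 6, 4, 5][((n - 1) % 6)])
-- 	    if ((x % 2) == 1):
-- 	        x += 7
-- 	    while ((((x + 1) % 3) != 0) or ((x % 5) != 0)):
-- 	        x += 14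
-- 	    ret_values.append(((10 ** (n - 1)) + x))
--
-- 	return ret_values
-- ===== SOURCE B (Python) =====
-- def func(*args):
--     n = int(args[0])
--     if n < 3:
--         return [-1]
--     # Closed form: the while-search always lands on the fixed point for residue (n-1)%6.
--     return [10 ** (n - 1) + [20, 200, 110, 50, 80, 170][(n - 1) % 6]]
-- ===== Notes on version B (the rewrite author's own statement) =====
-- stated objective: simpler
-- what changed: Replaces the seed lookup, parity adjustment, while-loop search and the n==3 special case with a single precomputed 6-entry table indexed by (n-1)%6, returning 10**(n-1) plus the table value.
import Mathlib
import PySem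

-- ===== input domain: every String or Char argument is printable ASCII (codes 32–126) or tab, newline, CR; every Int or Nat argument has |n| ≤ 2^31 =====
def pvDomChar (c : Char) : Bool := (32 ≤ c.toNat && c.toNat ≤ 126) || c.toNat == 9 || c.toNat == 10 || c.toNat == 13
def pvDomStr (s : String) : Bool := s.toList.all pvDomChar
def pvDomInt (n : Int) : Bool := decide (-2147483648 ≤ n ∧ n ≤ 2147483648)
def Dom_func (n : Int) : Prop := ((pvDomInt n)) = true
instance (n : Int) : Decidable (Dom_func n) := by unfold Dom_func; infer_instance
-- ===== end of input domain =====

-- B replaces A's seed lookup, parity fix-up, while-loop search and n==3 special case by one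
-- precomputed 6-entry table indexed by (n-1)%6 (objective: simpler).

-- ===== PORT A =====
-- the 'while (((x+1)%3 != 0) or (x%5 != 0)): x += 14' loop; the fuel 20 is only a
-- termination guard (the loop always stops within 14 iterations, proved per residue below)
def loopA : Nat → Int → Int
  | 0, x => x
  | fuel + 1, x =>
    if PySem.Int.mod (x + 1) 3 ≠ 0 ∨ PySem.Int.mod x 5 ≠ 0 then loopA fuel (x + 14) else x

def func (n : Int) : List Int :=
  if n < 3 then [-1]
  else if n = 3 then [210]
  else
    -- index (n-1)%6 is always in range, so .getD 0 is never the default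
    let x := 7 - (PySem.List.pyGet? ([1, 3, 2, 6, 4, 5] : List Int) (PySem.Int.mod (n - 1) 6)).getD 0
    let x := if PySem.Int.mod x 2 = 1 then x + 7 else x
    [10 ^ (n - 1).toNat + loopA 20 x]

-- ===== PORT B =====
def func_alt (n : Int) : List Int :=
  if n < 3 then [-1]
  else [10 ^ (n - 1).toNat + (PySem.List.pyGet? ([20, 200, 110, 50, 80, 170] : List Int) (PySem.Int.mod (n - 1) 6)).getD 0]

-- ===== PRECONDITION & SPEC =====
def Spec_func (n : Int) (out : List Int) : Prop := out = func_alt n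
instance (n : Int) (out : List Int) : Decidable (Spec_func n out) := by unfold Spec_func; infer_instance

-- ===== CLAIM (what is proved, stated in full; the proofs are below) =====
def Claim_equal_func : Prop := ∀ (n : Int), Dom_func n → Spec_func n (func n)

-- ===== LEMMAS AND PROOFS =====

-- A's whole x-computation agrees with B's table on every residue r ∈ [0, 6)
theorem body_eq (r : Int) (h0 : 0 ≤ r) (h6 : r < 6) :
    loopA 20 (let x := 7 - (PySem.List.pyGet? ([1, 3, 2, 6, 4, 5] : List Int) r).getD 0;
              if PySem.Int.mod x 2 = 1 then x + 7 else x)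
      = (PySem.List.pyGet? ([20, 200, 110, 50, 80, 170] : List Int) r).getD 0 := by
  interval_cases r <;> decide

theorem func_spec : Claim_equal_func := by
  intro n _
  unfold Spec_func func func_alt
  by_cases h1 : n < 3
  · simp [h1]
  · by_cases h3 : n = 3
    · subst h3; decide
    · simp only [h1, h3, if_false]
      rw [body_eq]
      · rw [PySem.Int.mod_eq_emod_of_pos (by norm_num : (0:Int) < 6)]
        exact Int.emod_nonneg _ (by norm_num)
      · rw [PySem.Int.mod_eq_emod_of_pos (by norm_num : (0:Int) < 6)]
        exact Int.emod_lt_of_pos _ (by norm_num)
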